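-- pv_equiv track=rewrite | github.com/Ziaeemehr/miscellaneous | DSTools/pydelay/pydelay_version/2node/my_modules.py | func
-- ===== SOURCE A (Python) =====
-- def func(n,pop):
--     '''
--     n is 0 or 1
--     pop is 'I' or 'E'
--     represent the E1,I1,E2 and I2
--     '''
--     En0 = ['Exc1(t-dl)','Exc2(t-dl)'] # 0 for inside population
--     In0 = ['Inh1(t-dl)','Inh2(t-dl)']
--     En1 = ['Exc1(t-DL)','Exc2(t-DL)'] # 1 for between populations
--     In1 = ['Inh1(t-DL)','Inh2(t-DL)']
--
--     E_str = ['','']; coffE = ['',''];sE=['',''];Se=['','']; Ip = ['P1','P2']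
--     I_str = ['','']; coffI = ['',''];sI=['',''];Si=['','']; Iq = ['Q1','Q2']
--     for k in range(0,2):
--         coffE[k] = '1./tauE * (-'+En0[k]+'+ (kE - rE * '+En0[k]+')'
--         coffI[k] = '1./tauI * (-'+In0[k]+'+ (kI - rI * '+In0[k]+')'
--
--     for k in range(0,2):
--         for l in range(0,2):
--             if (k==l):
--                 continue
--             else:
--                 sE[k] = 'c1*'+En0[k]+'-c2*'+In0[k]+'+'+Ip[k]+'+eta*(a1*'+En1[l]+'-a2*'+In1[l]+')'
--                 sI[k] = 'c3*'+En0[k]+'-c4*'+In0[k]+'+'+Iq[k]+'+eta*(a3*'+En1[l]+'-a4*'+In1[l]+')'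
--     for k in range(0,2):
--         for l in range(0,2):
--             if (k==l):
--                 continue
--             else:
--                 Se[k] = '(1./(1+ exp(-aE*('+sE[k]+'-thetaE)))-1./(1.+exp(aE*thetaE)))'
--                 Si[k] = '(1./(1+ exp(-aI*('+sI[k]+'-thetaI)))-1./(1.+exp(aI*thetaI)))'
--     for k in range(0,2):
--         E_str[k] = coffE[k]+'*'+Se[k]+')'
--         I_str[k] = coffI[k]+'*'+Si[k]+')'
--     if (pop =='E'):
--         return E_str[n]
--     else:
--         return I_str[n]
-- ===== SOURCE B (Python) =====
-- def func(n, pop):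
--     # Build only the one requested equation string directly (no arrays, no loops).
--     i = n % 2                 # Python's wraparound indexing on the length-2 lists
--     s, o = str(i + 1), str(3 - (i + 1))   # self suffix, other-population suffix
--     E0 = f'Exc{s}(t-dl)'
--     I0 = f'Inh{s}(t-dl)'
--     E1 = f'Exc{o}(t-DL)'
--     I1 = f'Inh{o}(t-DL)'
--     if pop == 'E':
--         tau, k, r = 'tauE', 'kE', 'rE'
--         v0, ce, ci, drive, a, th, ae, ai = E0, 'c1', 'c2', f'P{s}', 'aE', 'thetaE', 'a1', 'a2'
--     else:
--         tau, k, r = 'tauI', 'kI', 'rI'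
--         v0, ce, ci, drive, a, th, ae, ai = I0, 'c3', 'c4', f'Q{s}', 'aI', 'thetaI', 'a3', 'a4'
--     s_expr = f'{ce}*{E0}-{ci}*{I0}+{drive}+eta*({ae}*{E1}-{ai}*{I1})'
--     act = f'(1./(1+ exp(-{a}*({s_expr}-{th})))-1./(1.+exp({a}*{th})))'
--     return f'1./{tau} * (-{v0}+ ({k} - {r} * {v0})*{act})'
-- ===== Notes on version B (the rewrite author's own statement) =====
-- stated objective: simpler
-- what changed: B deletes all eight length-2 string arrays and the four fill loops and builds only the single requested equation string directly, selecting the population's parameter names (tauE/kE/rE/c1/c2/P/aE/thetaE/a1/a2 vs the I versions) from pop and the self/other suffixes from n % 2.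
import Mathlib
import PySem

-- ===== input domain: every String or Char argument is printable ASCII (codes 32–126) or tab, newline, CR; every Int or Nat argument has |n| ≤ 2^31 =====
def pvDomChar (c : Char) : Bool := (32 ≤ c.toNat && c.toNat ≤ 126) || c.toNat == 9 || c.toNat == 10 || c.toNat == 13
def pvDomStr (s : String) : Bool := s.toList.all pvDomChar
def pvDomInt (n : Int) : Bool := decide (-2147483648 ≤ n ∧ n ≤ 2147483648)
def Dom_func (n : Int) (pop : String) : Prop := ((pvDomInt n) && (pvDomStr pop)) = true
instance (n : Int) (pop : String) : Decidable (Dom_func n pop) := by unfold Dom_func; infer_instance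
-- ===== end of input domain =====

-- B drops all the length-2 arrays and the four loops and builds only the one requested
-- string directly from parameter names selected by pop (objective: simpler).

-- ===== PORT A =====
-- literal transliteration: the four loops become foldls over pyRange 0 2 1 updating the
-- length-2 string arrays with pySetD; list reads are pyGetD (indices are in range here),
-- the final E_str[n]/I_str[n] read is pyGetD "" (total form, guarded by Pre_func)
def func (n : Int) (pop : String) : String :=
  let En0 : List String := ["Exc1(t-dl)", "Exc2(t-dl)"]
  let In0 : List String := ["Inh1(t-dl)", "Inh2(t-dl)"]
  let En1 : List String := ["Exc1(t-DL)", "Exc2(t-DL)"]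
  let In1 : List String := ["Inh1(t-DL)", "Inh2(t-DL)"]
  let Ip : List String := ["P1", "P2"]
  let Iq : List String := ["Q1", "Q2"]
  let coff := (PySem.List.pyRange 0 2 1).foldl (fun (st : List String × List String) k =>
      (PySem.List.pySetD st.1 k ("1./tauE * (-" ++ PySem.List.pyGetD En0 k "" ++ "+ (kE - rE * " ++ PySem.List.pyGetD En0 k "" ++ ")"),
       PySem.List.pySetD st.2 k ("1./tauI * (-" ++ PySem.List.pyGetD In0 k "" ++ "+ (kI - rI * " ++ PySem.List.pyGetD In0 k "" ++ ")")))
      (["", ""], ["", ""])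
  let coffE := coff.1
  let coffI := coff.2
  let sEI := (PySem.List.pyRange 0 2 1).foldl (fun (st : List String × List String) k =>
      (PySem.List.pyRange 0 2 1).foldl (fun (st : List String × List String) l =>
        if k == l then st
        else
          (PySem.List.pySetD st.1 k ("c1*" ++ PySem.List.pyGetD En0 k "" ++ "-c2*" ++ PySem.List.pyGetD In0 k "" ++ "+" ++ PySem.List.pyGetD Ip k "" ++ "+eta*(a1*" ++ PySem.List.pyGetD En1 l "" ++ "-a2*" ++ PySem.List.pyGetD In1 l "" ++ ")"),
           PySem.List.pySetD st.2 k ("c3*" ++ PySem.List.pyGetD En0 k "" ++ "-c4*" ++ PySem.List.pyGetD In0 k "" ++ "+" ++ PySem.List.pyGetD Iq k "" ++ "+eta*(a3*" ++ PySem.List.pyGetD En1 l "" ++ "-a4*" ++ PySem.List.pyGetD In1 l "" ++ ")"))) st)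
      (["", ""], ["", ""])
  let sE := sEI.1
  let sI := sEI.2
  let Sei := (PySem.List.pyRange 0 2 1).foldl (fun (st : List String × List String) k =>
      (PySem.List.pyRange 0 2 1).foldl (fun (st : List String × List String) l =>
        if k == l then st
        else
          (PySem.List.pySetD st.1 k ("(1./(1+ exp(-aE*(" ++ PySem.List.pyGetD sE k "" ++ "-thetaE)))-1./(1.+exp(aE*thetaE)))"),
           PySem.List.pySetD st.2 k ("(1./(1+ exp(-aI*(" ++ PySem.List.pyGetD sI k "" ++ "-thetaI)))-1./(1.+exp(aI*thetaI)))"))) st)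
      (["", ""], ["", ""])
  let Se := Sei.1
  let Si := Sei.2
  let strs := (PySem.List.pyRange 0 2 1).foldl (fun (st : List String × List String) k =>
      (PySem.List.pySetD st.1 k (PySem.List.pyGetD coffE k "" ++ "*" ++ PySem.List.pyGetD Se k "" ++ ")"),
       PySem.List.pySetD st.2 k (PySem.List.pyGetD coffI k "" ++ "*" ++ PySem.List.pyGetD Si k "" ++ ")")))
      (["", ""], ["", ""])
  if pop == "E" then PySem.List.pyGetD strs.1 n ""
  else PySem.List.pyGetD strs.2 n ""

-- ===== PORT B =====
def func_alt (n : Int) (pop : String) : String :=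
  let i := PySem.Int.mod n 2
  let s := PySem.Int.toStr (i + 1)
  let o := PySem.Int.toStr (3 - (i + 1))
  let E0 := "Exc" ++ s ++ "(t-dl)"
  let I0 := "Inh" ++ s ++ "(t-dl)"
  let E1 := "Exc" ++ o ++ "(t-DL)"
  let I1 := "Inh" ++ o ++ "(t-DL)"
  let p := if pop == "E" then ("tauE", "kE", "rE", E0, "c1", "c2", "P" ++ s, "aE", "thetaE", "a1", "a2")
           else ("tauI", "kI", "rI", I0, "c3", "c4", "Q" ++ s, "aI", "thetaI", "a3", "a4")
  match p with
  | (tau, k, r, v0, ce, ci, drive, a, th, ae, ai) =>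
    let sExpr := ce ++ "*" ++ E0 ++ "-" ++ ci ++ "*" ++ I0 ++ "+" ++ drive ++ "+eta*(" ++ ae ++ "*" ++ E1 ++ "-" ++ ai ++ "*" ++ I1 ++ ")"
    let act := "(1./(1+ exp(-" ++ a ++ "*(" ++ sExpr ++ "-" ++ th ++ ")))-1./(1.+exp(" ++ a ++ "*" ++ th ++ ")))"
    "1./" ++ tau ++ " * (-" ++ v0 ++ "+ (" ++ k ++ " - " ++ r ++ " * " ++ v0 ++ ")*" ++ act ++ ")"

-- ===== PRECONDITION & SPEC =====
-- Pre_ excludes exactly the n with |index| out of range of the length-2 lists, where A raises IndexError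
def Pre_func (n : Int) (pop : String) : Prop := -2 ≤ n ∧ n ≤ 1
instance (n : Int) (pop : String) : Decidable (Pre_func n pop) := by unfold Pre_func; infer_instance
def pvWitness_func : Int × String := (0, "E")


def Spec_func (n : Int) (pop : String) (out : String) : Prop := out = func_alt n pop
instance (n : Int) (pop : String) (out : String) : Decidable (Spec_func n pop out) := by unfold Spec_func; infer_instance

-- ===== CLAIM (what is proved, stated in full; the proofs are below) =====
def Claim_equal_func : Prop := ∀ (n : Int) (pop : String), Dom_func n pop → Pre_func n pop → Spec_func n pop (func n pop)

-- ===== LEMMAS AND PROOFS =====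
set_option maxHeartbeats 2000000 in
set_option maxRecDepth 8192 in
theorem func_eq_alt_of (n : Int) (h1 : -2 ≤ n) (h2 : n ≤ 1) (pop : String) :
    func n pop = func_alt n pop := by
  interval_cases n <;>
    cases hE : (pop == "E") <;>
      (simp only [func, func_alt, hE, Bool.false_eq_true, if_true, if_false]; decide)

-- ===== VERDICT (by name: the statement is the Claim_ definition above) =====
theorem func_spec : Claim_equal_func := by
  intro n pop _ hp
  exact func_eq_alt_of n hp.1 hp.2 pop
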